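-- pv_equiv track=rewrite | github.com/khush777/discoursegraphs | src/discoursegraphs/readwrite/rst/rstlatex.py | make_multisat
-- ===== SOURCE A (Python) =====
-- import string
--
-- NUC_TEMPLATE = string.Template("""{}{$nucleus}""")
--
-- SAT_TEMPLATE = string.Template("""{$relation}{$satellite}""")
--
-- def make_multisat(nucsat_tuples):
--     """Creates a rst.sty Latex string representation of a multi-satellite RST subtree
--     (i.e. a set of nucleus-satellite relations that share the same nucleus.
--     """
--     nucsat_tuples = [tup for tup in nucsat_tuples]  # unpack the iterable, so we can check its length
--     assert len(nucsat_tuples) > 1, \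
--         "A multisat relation bundle must contain more than one relation"
--
--     result = "\dirrel\n\t"
--     first_relation, remaining_relations = nucsat_tuples[0], nucsat_tuples[1:]
--
--     relname, nuc_types, elements = first_relation
--     first_nucleus_pos = current_nucleus_pos = nuc_types.index('N')
--     result_segments = []
--
--     for i, nuc_type in enumerate(nuc_types):
--         if nuc_type == 'N':
--             result_segments.append(NUC_TEMPLATE.substitute(nucleus=elements[i]))
--         else:
--             result_segments.append(SAT_TEMPLATE.substitute(satellite=elements[i], relation=relname))
--
--     for (relname, nuc_types, elements) in remaining_relations:
--         for i, nuc_type in enumerate(nuc_types):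
--             if nuc_type == 'N':  # all relations share the same nucleus, so we don't need to reprocess it.
--                 continue
--             else:
--                 result_segment = SAT_TEMPLATE.substitute(satellite=elements[i], relation=relname)
--                 if i < first_nucleus_pos:  # satellite comes before the nucleus
--                     result_segments.insert(current_nucleus_pos, result_segment)
--                     current_nucleus_pos += 1
--                 else:
--                     result_segments.append(result_segment)
--
--     return result + '\n\t'.join(result_segments)
-- ===== SOURCE B (Python) =====
-- def make_multisat(nucsat_tuples):
--     """Creates a rst.sty Latex string representation of a multi-satellite RST subtree
--     (i.e. a set of nucleus-satellite relations that share the same nucleus.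
--     """
--     nucsat_tuples = list(nucsat_tuples)
--     assert len(nucsat_tuples) > 1, \
--         "A multisat relation bundle must contain more than one relation"
--
--     relname, nuc_types, elements = nucsat_tuples[0]
--     npos = nuc_types.index('N')
--
--     # decorate: one flat list of (bucket, segment) pairs; bucket 0 = before the
--     # nucleus, 1 = the nucleus itself, 2 = after it.  A stable sort by bucket
--     # then recovers exactly the layout A builds with its moving insertion cursor.
--     keyed = [(0 if i < npos else (1 if i == npos else 2),
--               '{}{%s}' % elements[i] if t == 'N'
--               else '{%s}{%s}' % (relname, elements[i]))
--              for i, t in enumerate(nuc_types)]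
--     keyed += [(0 if i < npos else 2, '{%s}{%s}' % (rel, elems[i]))
--               for rel, types, elems in nucsat_tuples[1:]
--               for i, t in enumerate(types) if t != 'N']
--     keyed.sort(key=lambda p: p[0])
--     return '\\dirrel\n\t' + '\n\t'.join(seg for _, seg in keyed)
-- ===== Notes on version B (the rewrite author's own statement) =====
-- stated objective: alternative
-- what changed: Replaces A's single result list with a moving nucleus cursor and repeated list.insert by a decorate-sort-join scheme: every segment is generated once in one flat keyed list with a bucket key (0 = before nucleus, 1 = nucleus, 2 = after), and one stable sort by bucket recovers A's layout.
import Mathlib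
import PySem

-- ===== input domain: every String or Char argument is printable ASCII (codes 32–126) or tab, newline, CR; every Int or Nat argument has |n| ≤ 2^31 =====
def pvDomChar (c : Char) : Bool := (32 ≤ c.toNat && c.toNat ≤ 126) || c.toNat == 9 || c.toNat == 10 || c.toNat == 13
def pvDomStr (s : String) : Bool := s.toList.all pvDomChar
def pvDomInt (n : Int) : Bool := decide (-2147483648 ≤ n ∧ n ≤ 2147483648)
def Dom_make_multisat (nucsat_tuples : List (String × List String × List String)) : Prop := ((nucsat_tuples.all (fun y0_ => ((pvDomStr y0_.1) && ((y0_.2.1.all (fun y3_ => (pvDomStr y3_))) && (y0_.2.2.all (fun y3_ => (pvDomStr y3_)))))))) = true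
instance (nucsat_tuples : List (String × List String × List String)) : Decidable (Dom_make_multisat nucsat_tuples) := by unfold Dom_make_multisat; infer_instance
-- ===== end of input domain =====

-- B replaces A's moving-cursor list.insert construction by decorate-sort-join: every segment is
-- emitted once into one flat keyed list (bucket 0 = before the nucleus, 1 = nucleus, 2 = after)
-- and one stable sort by bucket recovers A's layout (objective: alternative algorithm).

-- ===== PORT A =====
-- shared formatting helpers = the module's NUC_TEMPLATE / SAT_TEMPLATE substitutions
def pvNucSeg (element : String) : String := "{}{" ++ element ++ "}"
def pvSatSeg (relation satellite : String) : String := "{" ++ relation ++ "}{" ++ satellite ++ "}"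

def make_multisat (nucsat_tuples : List (String × List String × List String)) : String :=
  match nucsat_tuples with
  | [] => ""   -- the assert fails in Python here (excluded by Pre_)
  | first :: remaining =>
    let relname := first.1
    let nuc_types := first.2.1
    let elements := first.2.2
    -- nuc_types.index('N'): ValueError (= none) excluded by Pre_
    let first_nucleus_pos : Nat := (PySem.List.index? nuc_types "N").getD 0
    let result_segments : List String :=
      (PySem.List.enumerate nuc_types 0).foldl
        (fun acc p =>
          if p.2 = "N" then acc ++ [pvNucSeg ((PySem.List.pyGet? elements p.1).getD "")]
          else acc ++ [pvSatSeg relname ((PySem.List.pyGet? elements p.1).getD "")]) []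
    let st :=
      remaining.foldl
        (fun (st : List String × Int) r =>
          (PySem.List.enumerate r.2.1 0).foldl
            (fun (st : List String × Int) p =>
              if p.2 = "N" then st
              else
                if p.1 < (first_nucleus_pos : Int) then
                  (PySem.List.insert st.1 st.2 (pvSatSeg r.1 ((PySem.List.pyGet? r.2.2 p.1).getD "")), st.2 + 1)
                else (st.1 ++ [pvSatSeg r.1 ((PySem.List.pyGet? r.2.2 p.1).getD "")], st.2)) st)
        (result_segments, (first_nucleus_pos : Int))
    "\\dirrel\n\t" ++ String.intercalate "\n\t" st.1

-- ===== PORT B =====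
def make_multisat_alt (nucsat_tuples : List (String × List String × List String)) : String :=
  match nucsat_tuples with
  | [] => ""   -- the assert fails in Python here (excluded by Pre_)
  | first :: remaining =>
    let relname := first.1
    let nuc_types := first.2.1
    let elements := first.2.2
    let npos : Nat := (PySem.List.index? nuc_types "N").getD 0
    -- Source B's first comprehension: decorate the first relation's segments with bucket 0/1/2
    let keyed : List (Nat × String) :=
      (PySem.List.enumerate nuc_types 0).map
        (fun p => ((if p.1 < (npos : Int) then 0 else if p.1 = (npos : Int) then 1 else 2),
                   if p.2 = "N" then pvNucSeg ((PySem.List.pyGet? elements p.1).getD "")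
                   else pvSatSeg relname ((PySem.List.pyGet? elements p.1).getD "")))
      -- Source B's second (nested) comprehension: later relations' satellites, bucket 0 or 2
      ++ remaining.flatMap
        (fun r => ((PySem.List.enumerate r.2.1 0).filter (fun p => decide (p.2 ≠ "N"))).map
          (fun p => ((if p.1 < (npos : Int) then 0 else 2),
                     pvSatSeg r.1 ((PySem.List.pyGet? r.2.2 p.1).getD ""))))
    -- keyed.sort(key=lambda p: p[0]) — stable
    "\\dirrel\n\t" ++ String.intercalate "\n\t"
      ((PySem.List.sorted keyed (fun p => p.1) false).map (fun p => p.2))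

-- ===== PRECONDITION & SPEC =====
-- Pre_ = exactly where Python A returns: at least two relations (the assert), 'N' present in the
-- first relation's nuc_types (else ValueError), and every accessed elements[i] in range (else IndexError).
def Pre_make_multisat (nucsat_tuples : List (String × List String × List String)) : Prop :=
  2 ≤ nucsat_tuples.length ∧
  (∀ f ∈ nucsat_tuples.take 1, "N" ∈ f.2.1 ∧ f.2.1.length ≤ f.2.2.length) ∧
  (∀ r ∈ nucsat_tuples.drop 1, ∀ p ∈ PySem.List.enumerate r.2.1 0,
      p.2 ≠ "N" → p.1 < (r.2.2.length : Int))
instance (nucsat_tuples : List (String × List String × List String)) : Decidable (Pre_make_multisat nucsat_tuples) := by unfold Pre_make_multisat; infer_instance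

def pvWitness_make_multisat : (List (String × List String × List String)) :=
  [("circumstance", ["N", "S"], ["e1", "e2"]), ("elaboration", ["N", "S"], ["e1", "e3"])]

def Spec_make_multisat (nucsat_tuples : List (String × List String × List String)) (out : String) : Prop := out = make_multisat_alt nucsat_tuples
instance (nucsat_tuples : List (String × List String × List String)) (out : String) : Decidable (Spec_make_multisat nucsat_tuples out) := by unfold Spec_make_multisat; infer_instance

-- ===== CLAIM (what is proved, stated in full; the proofs are below) =====
def Claim_equal_make_multisat : Prop := ∀ (nucsat_tuples : List (String × List String × List String)), Dom_make_multisat nucsat_tuples → Pre_make_multisat nucsat_tuples → Spec_make_multisat nucsat_tuples (make_multisat nucsat_tuples)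

-- ===== LEMMAS AND PROOFS =====

-- proof-side abbreviation: the segment Source B/A produce for an enumerate pair of the first relation
def pvSegB (rel : String) (elements : List String) (p : Int × String) : String :=
  if p.2 = "N" then pvNucSeg ((PySem.List.pyGet? elements p.1).getD "")
  else pvSatSeg rel ((PySem.List.pyGet? elements p.1).getD "")

-- A's first loop appends one pvSegB-segment per enumerate pair
theorem pvA_first_loop (nt es : List String) (rel : String) :
    (PySem.List.enumerate nt 0).foldl
        (fun acc p =>
          if p.2 = "N" then acc ++ [pvNucSeg ((PySem.List.pyGet? es p.1).getD "")]
          else acc ++ [pvSatSeg rel ((PySem.List.pyGet? es p.1).getD "")]) []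
      = (PySem.List.enumerate nt 0).map (pvSegB rel es) := by
  have hfun : (fun (acc : List String) (p : Int × String) =>
          if p.2 = "N" then acc ++ [pvNucSeg ((PySem.List.pyGet? es p.1).getD "")]
          else acc ++ [pvSatSeg rel ((PySem.List.pyGet? es p.1).getD "")])
      = fun acc p => acc ++ [pvSegB rel es p] := by
    funext acc p; unfold pvSegB; split <;> rfl
  rw [hfun]
  simpa using PySem.List.foldl_append_singleton_eq_map (pvSegB rel es) (PySem.List.enumerate nt 0) ([])

-- invariant of A's inner loop over one remaining relation (cursor = length of the pre part)
theorem pvA_inner_loop (rel : String) (es : List String) (k : Nat) (nuc : String)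
    (l : List (Int × String)) : ∀ (P Q : List String),
    l.foldl
        (fun (st : List String × Int) p =>
          if p.2 = "N" then st
          else
            if p.1 < (k : Int) then
              (PySem.List.insert st.1 st.2 (pvSatSeg rel ((PySem.List.pyGet? es p.1).getD "")), st.2 + 1)
            else (st.1 ++ [pvSatSeg rel ((PySem.List.pyGet? es p.1).getD "")], st.2))
        (P ++ nuc :: Q, (P.length : Int))
      = (((P ++ (l.filter (fun p => decide (p.2 ≠ "N" ∧ p.1 < (k : Int)))).map
              (fun p => pvSatSeg rel ((PySem.List.pyGet? es p.1).getD ""))) ++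
          nuc :: (Q ++ (l.filter (fun p => decide (p.2 ≠ "N" ∧ ¬ p.1 < (k : Int)))).map
              (fun p => pvSatSeg rel ((PySem.List.pyGet? es p.1).getD "")))),
         ((P ++ (l.filter (fun p => decide (p.2 ≠ "N" ∧ p.1 < (k : Int)))).map
              (fun p => pvSatSeg rel ((PySem.List.pyGet? es p.1).getD ""))).length : Int)) := by
  induction l with
  | nil => intro P Q; simp
  | cons p l ih =>
    intro P Q
    by_cases hN : p.2 = "N"
    · simp [List.foldl_cons, hN, ih P Q]
    · by_cases hlt : p.1 < (k : Int)
      · have hins : PySem.List.insert (P ++ nuc :: Q) ((P.length : Nat) : Int)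
              (pvSatSeg rel ((PySem.List.pyGet? es p.1).getD ""))
            = (P ++ [pvSatSeg rel ((PySem.List.pyGet? es p.1).getD "")]) ++ nuc :: Q := by
          rw [PySem.List.insert_natCast _ _ _ (by simp)]
          simp
        have hlen : ((P.length : Int) + 1)
            = (((P ++ [pvSatSeg rel ((PySem.List.pyGet? es p.1).getD "")]).length : Nat) : Int) := by
          simp
        simp only [List.foldl_cons, hN, hlt, if_true, if_false]
        rw [hins, hlen, ih (P ++ [pvSatSeg rel ((PySem.List.pyGet? es p.1).getD "")]) Q]
        simp [hN, hlt]
      · have hge := not_lt.mp hlt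
        have := ih P (Q ++ [pvSatSeg rel ((PySem.List.pyGet? es p.1).getD "")])
        simp only [List.foldl_cons]
        simp [hN, hlt, hge, this]

-- A's outer loop over the remaining relations: pre satellites gather before the nucleus, post after
theorem pvA_outer_loop (k : Nat) (nuc : String)
    (rem : List (String × List String × List String)) : ∀ (P Q : List String),
    rem.foldl
        (fun (st : List String × Int) r =>
          (PySem.List.enumerate r.2.1 0).foldl
            (fun (st : List String × Int) p =>
              if p.2 = "N" then st
              else
                if p.1 < (k : Int) then
                  (PySem.List.insert st.1 st.2 (pvSatSeg r.1 ((PySem.List.pyGet? r.2.2 p.1).getD "")), st.2 + 1)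
                else (st.1 ++ [pvSatSeg r.1 ((PySem.List.pyGet? r.2.2 p.1).getD "")], st.2)) st)
        (P ++ nuc :: Q, (P.length : Int))
      = (let stB := rem.foldl
            (fun (st : List String × List String) r =>
              (st.1 ++ ((PySem.List.enumerate r.2.1 0).filter
                    (fun p => decide (p.2 ≠ "N" ∧ p.1 < (k : Int)))).map
                    (fun p => pvSatSeg r.1 ((PySem.List.pyGet? r.2.2 p.1).getD "")),
               st.2 ++ ((PySem.List.enumerate r.2.1 0).filter
                    (fun p => decide (p.2 ≠ "N" ∧ ¬ p.1 < (k : Int)))).map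
                    (fun p => pvSatSeg r.1 ((PySem.List.pyGet? r.2.2 p.1).getD ""))))
            (P, Q);
         (stB.1 ++ nuc :: stB.2, (stB.1.length : Int))) := by
  induction rem with
  | nil => intro P Q; simp
  | cons r rem ih =>
    intro P Q
    simp only [List.foldl_cons]
    rw [pvA_inner_loop r.1 r.2.2 k nuc (PySem.List.enumerate r.2.1 0) P Q]
    exact ih _ _

-- wrapper of pvA_outer_loop with the cursor abstracted (for rewriting)
theorem pvA_outer_loop' (k : Nat) (nuc : String)
    (rem : List (String × List String × List String)) (P Q : List String)
    (c : Int) (hc : c = (P.length : Int)) :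
    rem.foldl
        (fun (st : List String × Int) r =>
          (PySem.List.enumerate r.2.1 0).foldl
            (fun (st : List String × Int) p =>
              if p.2 = "N" then st
              else
                if p.1 < (k : Int) then
                  (PySem.List.insert st.1 st.2 (pvSatSeg r.1 ((PySem.List.pyGet? r.2.2 p.1).getD "")), st.2 + 1)
                else (st.1 ++ [pvSatSeg r.1 ((PySem.List.pyGet? r.2.2 p.1).getD "")], st.2)) st)
        (P ++ nuc :: Q, c)
      = (let stB := rem.foldl
            (fun (st : List String × List String) r =>
              (st.1 ++ ((PySem.List.enumerate r.2.1 0).filter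
                    (fun p => decide (p.2 ≠ "N" ∧ p.1 < (k : Int)))).map
                    (fun p => pvSatSeg r.1 ((PySem.List.pyGet? r.2.2 p.1).getD "")),
               st.2 ++ ((PySem.List.enumerate r.2.1 0).filter
                    (fun p => decide (p.2 ≠ "N" ∧ ¬ p.1 < (k : Int)))).map
                    (fun p => pvSatSeg r.1 ((PySem.List.pyGet? r.2.2 p.1).getD ""))))
            (P, Q);
         (stB.1 ++ nuc :: stB.2, (stB.1.length : Int))) := by
  rw [hc]; exact pvA_outer_loop k nuc rem P Q

-- a two-list append fold is a pair of flatMaps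
theorem pvFoldl_pair_append {β : Type} (X Y : β → List String) (l : List β) :
    ∀ (P Q : List String),
    l.foldl (fun (st : List String × List String) r => (st.1 ++ X r, st.2 ++ Y r)) (P, Q)
      = (P ++ l.flatMap X, Q ++ l.flatMap Y) := by
  induction l with
  | nil => intro P Q; simp
  | cons r l ih => intro P Q; simp [List.foldl_cons, ih]

-- filter distributes over flatMap
theorem pvFilter_flatMap {β α : Type} (g : β → List α) (q : α → Bool) (l : List β) :
    (l.flatMap g).filter q = l.flatMap (fun r => (g r).filter q) := by
  induction l with
  | nil => rfl
  | cons r l ih => simp [List.flatMap_cons, List.filter_append, ih]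

-- stable insertion: skip a prefix the new element does not go before
theorem pvInsertBy_append {α : Type} (before : α → α → Bool) (x : α) (ys zs : List α)
    (h : ∀ y ∈ ys, before x y = false) :
    PySem.List.insertBy before x (ys ++ zs) = ys ++ PySem.List.insertBy before x zs := by
  induction ys with
  | nil => rfl
  | cons y ys ih =>
    have hy : before x y = false := h y (by simp)
    simp only [List.cons_append, PySem.List.insertBy, hy]
    simp only [Bool.false_eq_true, if_false]
    rw [show PySem.List.insertBy before x (ys ++ zs) = ys ++ PySem.List.insertBy before x zs from
      ih (fun y hy => h y (by simp [hy]))]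

-- stable insertion: goes to the very front when it goes before everything
theorem pvInsertBy_front {α : Type} (before : α → α → Bool) (x : α) (zs : List α)
    (h : ∀ y ∈ zs, before x y = true) :
    PySem.List.insertBy before x zs = x :: zs := by
  cases zs with
  | nil => rfl
  | cons y ys =>
    have hy : before x y = true := h y (by simp)
    simp [PySem.List.insertBy, hy]

-- a stable sort by a 3-valued bucket key is the concatenation of the three buckets in order
theorem pvSorted_bucket3 {α : Type} (key : α → Nat) (l : List α) (h : ∀ p ∈ l, key p ≤ 2) :
    PySem.List.sorted l key false
      = l.filter (fun x => key x == 0) ++ l.filter (fun x => key x == 1)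
          ++ l.filter (fun x => key x == 2) := by
  rw [PySem.List.sorted_eq_foldl_insertBy]
  induction l using List.reverseRecOn with
  | nil => rfl
  | append_singleton l x ih =>
    have hl : ∀ p ∈ l, key p ≤ 2 := fun p hp => h p (by simp [hp])
    have hx : key x ≤ 2 := h x (by simp)
    rw [List.foldl_append, List.foldl_cons, List.foldl_nil, ih hl]
    have mem0 : ∀ y ∈ l.filter (fun x => key x == 0), key y = 0 := by
      intro y hy; simpa using (List.mem_filter.mp hy).2
    have mem1 : ∀ y ∈ l.filter (fun x => key x == 1), key y = 1 := by
      intro y hy; simpa using (List.mem_filter.mp hy).2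
    have mem2 : ∀ y ∈ l.filter (fun x => key x == 2), key y = 2 := by
      intro y hy; simpa using (List.mem_filter.mp hy).2
    interval_cases hkx : key x
    · -- bucket 0: after the 0-bucket, before everything in buckets 1 and 2
      rw [List.append_assoc,
          pvInsertBy_append _ _ _ _ (by intro y hy; simp [mem0 y hy, hkx]),
          pvInsertBy_front _ _ _ (by
            intro y hy
            rcases List.mem_append.mp hy with hy1 | hy2
            · simp [mem1 y hy1, hkx]
            · simp [mem2 y hy2, hkx])]
      simp [List.filter_append, hkx, List.append_assoc]
    · -- bucket 1: after buckets 0 and 1, before bucket 2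
      rw [pvInsertBy_append _ _ _ _ (by
            intro y hy
            rcases List.mem_append.mp hy with hy0 | hy1
            · simp [mem0 y hy0, hkx]
            · simp [mem1 y hy1, hkx]),
          pvInsertBy_front _ _ _ (by intro y hy; simp [mem2 y hy, hkx])]
      simp [List.filter_append, hkx, List.append_assoc]
    · -- bucket 2: after everything
      rw [PySem.List.insertBy_of_forall_not_before _ _ _ (by
          intro y hy
          rcases List.mem_append.mp hy with hy01 | hy2
          · rcases List.mem_append.mp hy01 with hy0 | hy1
            · simp [mem0 y hy0, hkx]
            · simp [mem1 y hy1, hkx]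
          · simp [mem2 y hy2, hkx])]
      simp [List.filter_append, hkx, List.append_assoc]

-- the B side: the stable bucket sort of the keyed list, stripped of its keys,
-- is exactly A's pre ++ nucleus :: post layout
theorem pvB_list (rel : String) (es pre suf : List String) (k : Nat) (hklen : pre.length = k)
    (rem : List (String × List String × List String)) :
    ((PySem.List.sorted
        (((PySem.List.enumerate (pre ++ "N" :: suf) 0).map
          (fun p => ((if p.1 < (k : Int) then 0 else if p.1 = (k : Int) then 1 else 2 : Nat),
                     if p.2 = "N" then pvNucSeg ((PySem.List.pyGet? es p.1).getD "")
                     else pvSatSeg rel ((PySem.List.pyGet? es p.1).getD ""))))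
         ++ rem.flatMap (fun r => ((PySem.List.enumerate r.2.1 0).filter (fun p => decide (p.2 ≠ "N"))).map
              (fun p => ((if p.1 < (k : Int) then 0 else 2 : Nat),
                         pvSatSeg r.1 ((PySem.List.pyGet? r.2.2 p.1).getD "")))))
        (fun p => p.1) false).map (fun p => p.2))
    = ((PySem.List.enumerate pre 0).map (pvSegB rel es)
        ++ rem.flatMap (fun r => ((PySem.List.enumerate r.2.1 0).filter
              (fun p => decide (p.2 ≠ "N" ∧ p.1 < (k : Int)))).map
              (fun p => pvSatSeg r.1 ((PySem.List.pyGet? r.2.2 p.1).getD ""))))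
      ++ pvNucSeg ((PySem.List.pyGet? es (k : Int)).getD "")
        :: ((PySem.List.enumerate suf ((k : Int) + 1)).map (pvSegB rel es)
            ++ rem.flatMap (fun r => ((PySem.List.enumerate r.2.1 0).filter
                  (fun p => decide (p.2 ≠ "N" ∧ ¬ p.1 < (k : Int)))).map
                  (fun p => pvSatSeg r.1 ((PySem.List.pyGet? r.2.2 p.1).getD "")))) := by
  have henum : PySem.List.enumerate (pre ++ "N" :: suf) 0
      = PySem.List.enumerate pre 0 ++ ((k : Int), "N") :: PySem.List.enumerate suf ((k : Int) + 1) := by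
    rw [PySem.List.enumerate_append, PySem.List.enumerate_cons]
    simp [hklen]
  -- every key in the keyed list is ≤ 2
  rw [pvSorted_bucket3 _ _ (by
    intro p hp
    rcases List.mem_append.mp hp with h1 | h2
    · obtain ⟨q, _, rfl⟩ := List.mem_map.mp h1
      dsimp only; split <;> [omega; split <;> omega]
    · obtain ⟨r, _, hr⟩ := List.mem_flatMap.mp h2
      obtain ⟨q, _, rfl⟩ := List.mem_map.mp hr
      dsimp only; split <;> omega)]
  -- keys on the three pieces of the first relation's enumerate
  have hpre : ∀ p ∈ PySem.List.enumerate pre 0, p.1 < (k : Int) := by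
    intro p hp
    obtain ⟨j, hj, rfl⟩ := (PySem.List.mem_enumerate_iff _ _ _).mp hp
    push_cast; omega
  have hsuf : ∀ p ∈ PySem.List.enumerate suf ((k : Int) + 1),
      ¬ p.1 < (k : Int) ∧ p.1 ≠ (k : Int) := by
    intro p hp
    obtain ⟨j, hj, rfl⟩ := (PySem.List.mem_enumerate_iff _ _ _).mp hp
    constructor <;> [push_cast; push_cast] <;> omega
  -- split the first relation's keyed list around the nucleus pair
  have hkeyed : (PySem.List.enumerate (pre ++ "N" :: suf) 0).map
        (fun p => ((if p.1 < (k : Int) then 0 else if p.1 = (k : Int) then 1 else 2 : Nat),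
                   if p.2 = "N" then pvNucSeg ((PySem.List.pyGet? es p.1).getD "")
                   else pvSatSeg rel ((PySem.List.pyGet? es p.1).getD "")))
      = (PySem.List.enumerate pre 0).map
          (fun p => ((if p.1 < (k : Int) then 0 else if p.1 = (k : Int) then 1 else 2 : Nat),
                     if p.2 = "N" then pvNucSeg ((PySem.List.pyGet? es p.1).getD "")
                     else pvSatSeg rel ((PySem.List.pyGet? es p.1).getD "")))
        ++ ((1 : Nat), pvNucSeg ((PySem.List.pyGet? es (k : Int)).getD ""))
          :: (PySem.List.enumerate suf ((k : Int) + 1)).map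
              (fun p => ((if p.1 < (k : Int) then 0 else if p.1 = (k : Int) then 1 else 2 : Nat),
                         if p.2 = "N" then pvNucSeg ((PySem.List.pyGet? es p.1).getD "")
                         else pvSatSeg rel ((PySem.List.pyGet? es p.1).getD ""))) := by
    rw [henum]; simp
  -- first relation: the bucket filters select exactly the pre / suf pieces
  have e0 : ((PySem.List.enumerate pre 0).map
        (fun p => ((if p.1 < (k : Int) then 0 else if p.1 = (k : Int) then 1 else 2 : Nat),
                   if p.2 = "N" then pvNucSeg ((PySem.List.pyGet? es p.1).getD "")
                   else pvSatSeg rel ((PySem.List.pyGet? es p.1).getD "")))).filter (fun x => x.1 == 0)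
      = (PySem.List.enumerate pre 0).map
          (fun p => ((if p.1 < (k : Int) then 0 else if p.1 = (k : Int) then 1 else 2 : Nat),
                     if p.2 = "N" then pvNucSeg ((PySem.List.pyGet? es p.1).getD "")
                     else pvSatSeg rel ((PySem.List.pyGet? es p.1).getD ""))) := by
    apply List.filter_eq_self.mpr
    intro x hx
    obtain ⟨p, hp, rfl⟩ := List.mem_map.mp hx
    simp [hpre p hp]
  have e1 : ∀ (b : Nat), b ≠ 0 → ((PySem.List.enumerate pre 0).map
        (fun p => ((if p.1 < (k : Int) then 0 else if p.1 = (k : Int) then 1 else 2 : Nat),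
                   if p.2 = "N" then pvNucSeg ((PySem.List.pyGet? es p.1).getD "")
                   else pvSatSeg rel ((PySem.List.pyGet? es p.1).getD "")))).filter (fun x => x.1 == b)
      = [] := by
    intro b hb
    apply List.filter_eq_nil_iff.mpr
    intro x hx
    obtain ⟨p, hp, rfl⟩ := List.mem_map.mp hx
    simp [hpre p hp]; omega
  have s2 : ((PySem.List.enumerate suf ((k : Int) + 1)).map
        (fun p => ((if p.1 < (k : Int) then 0 else if p.1 = (k : Int) then 1 else 2 : Nat),
                   if p.2 = "N" then pvNucSeg ((PySem.List.pyGet? es p.1).getD "")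
                   else pvSatSeg rel ((PySem.List.pyGet? es p.1).getD "")))).filter (fun x => x.1 == 2)
      = (PySem.List.enumerate suf ((k : Int) + 1)).map
          (fun p => ((if p.1 < (k : Int) then 0 else if p.1 = (k : Int) then 1 else 2 : Nat),
                     if p.2 = "N" then pvNucSeg ((PySem.List.pyGet? es p.1).getD "")
                     else pvSatSeg rel ((PySem.List.pyGet? es p.1).getD ""))) := by
    apply List.filter_eq_self.mpr
    intro x hx
    obtain ⟨p, hp, rfl⟩ := List.mem_map.mp hx
    simp [(hsuf p hp).1, (hsuf p hp).2]
  have s0 : ∀ (b : Nat), b ≠ 2 → ((PySem.List.enumerate suf ((k : Int) + 1)).map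
        (fun p => ((if p.1 < (k : Int) then 0 else if p.1 = (k : Int) then 1 else 2 : Nat),
                   if p.2 = "N" then pvNucSeg ((PySem.List.pyGet? es p.1).getD "")
                   else pvSatSeg rel ((PySem.List.pyGet? es p.1).getD "")))).filter (fun x => x.1 == b)
      = [] := by
    intro b hb
    apply List.filter_eq_nil_iff.mpr
    intro x hx
    obtain ⟨p, hp, rfl⟩ := List.mem_map.mp hx
    simp [(hsuf p hp).1, (hsuf p hp).2]; omega
  -- later relations: the bucket filter of one relation's keyed satellites
  have f0 : ∀ (r : String × List String × List String),
      (((PySem.List.enumerate r.2.1 0).filter (fun p => decide (p.2 ≠ "N"))).map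
        (fun p => ((if p.1 < (k : Int) then 0 else 2 : Nat),
                   pvSatSeg r.1 ((PySem.List.pyGet? r.2.2 p.1).getD "")))).filter (fun x => x.1 == 0)
      = ((PySem.List.enumerate r.2.1 0).filter (fun p => decide (p.2 ≠ "N" ∧ p.1 < (k : Int)))).map
          (fun p => ((if p.1 < (k : Int) then 0 else 2 : Nat),
                     pvSatSeg r.1 ((PySem.List.pyGet? r.2.2 p.1).getD ""))) := by
    intro r
    rw [List.filter_map, List.filter_filter]
    congr 1
    apply List.filter_congr
    intro p _
    by_cases h : p.1 < (k : Int) <;> by_cases hN : p.2 = "N" <;> simp [h, hN]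
  have f1b : ∀ (r : String × List String × List String),
      (((PySem.List.enumerate r.2.1 0).filter (fun p => decide (p.2 ≠ "N"))).map
        (fun p => ((if p.1 < (k : Int) then 0 else 2 : Nat),
                   pvSatSeg r.1 ((PySem.List.pyGet? r.2.2 p.1).getD "")))).filter (fun x => x.1 == 1)
      = [] := by
    intro r
    apply List.filter_eq_nil_iff.mpr
    intro x hx
    obtain ⟨p, _, rfl⟩ := List.mem_map.mp hx
    dsimp only; split <;> simp
  have f2 : ∀ (r : String × List String × List String),
      (((PySem.List.enumerate r.2.1 0).filter (fun p => decide (p.2 ≠ "N"))).map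
        (fun p => ((if p.1 < (k : Int) then 0 else 2 : Nat),
                   pvSatSeg r.1 ((PySem.List.pyGet? r.2.2 p.1).getD "")))).filter (fun x => x.1 == 2)
      = ((PySem.List.enumerate r.2.1 0).filter (fun p => decide (p.2 ≠ "N" ∧ ¬ p.1 < (k : Int)))).map
          (fun p => ((if p.1 < (k : Int) then 0 else 2 : Nat),
                     pvSatSeg r.1 ((PySem.List.pyGet? r.2.2 p.1).getD ""))) := by
    intro r
    rw [List.filter_map, List.filter_filter]
    congr 1
    apply List.filter_congr
    intro p _
    by_cases h : p.1 < (k : Int) <;> by_cases hN : p.2 = "N" <;> simp [h, hN]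
  rw [hkeyed]
  simp only [List.filter_append, List.filter_cons, pvFilter_flatMap]
  simp only [show (((1 : Nat) == 0) = true) = False by simp,
             show (((1 : Nat) == 1) = true) = True by simp,
             show (((1 : Nat) == 2) = true) = False by simp, if_true, if_false]
  rw [e0, e1 1 (by omega), e1 2 (by omega), s2, s0 0 (by omega), s0 1 (by omega),
      show (fun (r : String × List String × List String) =>
          (((PySem.List.enumerate r.2.1 0).filter (fun p => decide (p.2 ≠ "N"))).map
            (fun p => ((if p.1 < (k : Int) then 0 else 2 : Nat),
                       pvSatSeg r.1 ((PySem.List.pyGet? r.2.2 p.1).getD "")))).filter (fun x => x.1 == 0))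
        = (fun r => ((PySem.List.enumerate r.2.1 0).filter (fun p => decide (p.2 ≠ "N" ∧ p.1 < (k : Int)))).map
            (fun p => ((if p.1 < (k : Int) then 0 else 2 : Nat),
                       pvSatSeg r.1 ((PySem.List.pyGet? r.2.2 p.1).getD "")))) from funext f0,
      show (fun (r : String × List String × List String) =>
          (((PySem.List.enumerate r.2.1 0).filter (fun p => decide (p.2 ≠ "N"))).map
            (fun p => ((if p.1 < (k : Int) then 0 else 2 : Nat),
                       pvSatSeg r.1 ((PySem.List.pyGet? r.2.2 p.1).getD "")))).filter (fun x => x.1 == 1))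
        = (fun _ => ([] : List (Nat × String))) from funext f1b,
      show (fun (r : String × List String × List String) =>
          (((PySem.List.enumerate r.2.1 0).filter (fun p => decide (p.2 ≠ "N"))).map
            (fun p => ((if p.1 < (k : Int) then 0 else 2 : Nat),
                       pvSatSeg r.1 ((PySem.List.pyGet? r.2.2 p.1).getD "")))).filter (fun x => x.1 == 2))
        = (fun r => ((PySem.List.enumerate r.2.1 0).filter (fun p => decide (p.2 ≠ "N" ∧ ¬ p.1 < (k : Int)))).map
            (fun p => ((if p.1 < (k : Int) then 0 else 2 : Nat),
                       pvSatSeg r.1 ((PySem.List.pyGet? r.2.2 p.1).getD "")))) from funext f2]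
  have hnil : rem.flatMap (fun _ => ([] : List (Nat × String))) = [] := by
    induction rem with
    | nil => rfl
    | cons r l ih => simp [ih]
  have hseg : (fun (x : Int × String) =>
      if x.2 = "N" then pvNucSeg ((PySem.List.pyGet? es x.1).getD "")
      else pvSatSeg rel ((PySem.List.pyGet? es x.1).getD "")) = pvSegB rel es := rfl
  simp [List.map_append, List.map_map, List.map_flatMap, hnil, hseg, Function.comp_def]

-- ===== VERDICT (by name: the statement is the Claim_ definition above) =====
theorem make_multisat_spec : Claim_equal_make_multisat := by
  intro ts _hDom hPre
  obtain ⟨hlen, hfirst, _hrest⟩ := hPre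
  match ts with
  | [] => simp at hlen
  | (rel, nt, es) :: remaining =>
    obtain ⟨hN, _hle⟩ := hfirst (rel, nt, es) (by simp)
    have hN' : "N" ∈ nt := by simpa using hN
    obtain ⟨k, hk⟩ := Option.isSome_iff_exists.mp ((PySem.List.index?_isSome_iff nt "N").mpr hN')
    obtain ⟨pre, suf, hsplit, hklen, _hNpre⟩ := (PySem.List.index?_eq_some_iff _ _ _).mp hk
    have henum : PySem.List.enumerate nt 0
        = PySem.List.enumerate pre 0 ++ ((k : Int), "N") :: PySem.List.enumerate suf ((k : Int) + 1) := by
      rw [hsplit, PySem.List.enumerate_append, PySem.List.enumerate_cons]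
      simp [hklen]
    have hmap : (PySem.List.enumerate nt 0).map (pvSegB rel es)
        = (PySem.List.enumerate pre 0).map (pvSegB rel es) ++
            pvNucSeg ((PySem.List.pyGet? es (k : Int)).getD "") ::
            (PySem.List.enumerate suf ((k : Int) + 1)).map (pvSegB rel es) := by
      rw [henum]; simp [pvSegB]
    have hPAlen : ((PySem.List.enumerate pre 0).map (pvSegB rel es)).length = k := by
      simp [PySem.List.length_enumerate, hklen]
    show Spec_make_multisat _ _
    unfold Spec_make_multisat
    simp only [make_multisat, make_multisat_alt, hk, Option.getD_some]
    -- A's side: first loop → map, outer loop → two flatMaps around the nucleus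
    rw [pvA_first_loop nt es rel, hmap,
        pvA_outer_loop' k (pvNucSeg ((PySem.List.pyGet? es (k : Int)).getD ""))
          remaining _ _ (k : Int) (by rw [hPAlen]),
        pvFoldl_pair_append]
    -- B's side: stable bucket sort = bucket concatenation = the same layout
    rw [hsplit, pvB_list rel es pre suf k hklen remaining]
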